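-- pv_equiv track=rewrite | github.com/miskiewiczm/dna-generator | poc_exhaustive_15nt.py | check_dinucleotide_repeats
-- ===== SOURCE A (Python) =====
-- def check_dinucleotide_repeats(seq, max_repeats=3):
--     for i in range(4):
--         for j in range(4):
--             bases = 'ATGC'
--             dinuc = bases[i] + bases[j]
--             repeat = dinuc * (max_repeats + 1)
--             if repeat in seq:
--                 return False
--     return True
-- ===== SOURCE B (Python) =====
-- def check_dinucleotide_repeats(seq, max_repeats=3):
--     threshold = 2 * (max_repeats + 1)
--     run = 0
--     p2 = p1 = ''
--     for c in seq:
--         if c not in 'ATGC':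
--             run = 0
--         elif run >= 2 and c == p2:
--             run += 1
--         elif run >= 1:
--             run = 2
--         else:
--             run = 1
--         if run >= threshold:
--             return False
--         p2, p1 = p1, c
--     return True
-- ===== Notes on version B (the rewrite author's own statement) =====
-- stated objective: alternative
-- what changed: A searches the sequence 16 times, once for each repeated dinucleotide string; B makes a single left-to-right pass maintaining the length of the current period-2 run of ATGC bases and fails as soon as it reaches 2*(max_repeats+1).
-- intended difference: On the empty sequence with max_repeats <= -1, A returns False because the repeat string is empty and '' is a substring of everything, an accident of str multiplication; B returns True, which is intended since an empty sequence contains no repeated dinucleotide. — e.g. on check_dinucleotide_repeats("", -1): A returns false, B returns true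
import Mathlib
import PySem

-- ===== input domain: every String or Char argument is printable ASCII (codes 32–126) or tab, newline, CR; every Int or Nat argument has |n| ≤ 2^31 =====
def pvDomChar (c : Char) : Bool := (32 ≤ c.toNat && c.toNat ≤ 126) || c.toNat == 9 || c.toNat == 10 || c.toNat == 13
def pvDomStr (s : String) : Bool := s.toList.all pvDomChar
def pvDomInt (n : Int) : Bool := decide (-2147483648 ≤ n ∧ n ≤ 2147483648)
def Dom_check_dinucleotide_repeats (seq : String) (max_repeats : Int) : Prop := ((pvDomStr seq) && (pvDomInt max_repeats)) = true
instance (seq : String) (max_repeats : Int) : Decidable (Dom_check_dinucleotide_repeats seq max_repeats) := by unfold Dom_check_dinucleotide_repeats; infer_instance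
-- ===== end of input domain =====

-- B replaces A's 16 substring searches (one per dinucleotide) by a single left-to-right
-- scan maintaining the length of the current period-2 run of ATGC bases (objective: alternative one-pass algorithm).

-- ===== PORT A =====
-- for i in range(4): for j in range(4): if bases[i]+bases[j] repeated (max_repeats+1) times is in seq: return False
def check_dinucleotide_repeats (seq : String) (max_repeats : Int) : Bool :=
  !((PySem.List.pyRange 0 4 1).any (fun i =>
     (PySem.List.pyRange 0 4 1).any (fun j =>
       let bases := "ATGC"
       let dinuc := [(PySem.Str.pyGet? bases i).getD ' ', (PySem.Str.pyGet? bases j).getD ' ']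
       let rep := PySem.List.pyRepeat dinuc (max_repeats + 1)
       PySem.Chars.isIn rep seq.toList)))

-- ===== PORT B =====
-- c in 'ATGC' (c a single char)
def pvIsBase (c : Char) : Bool := c ∈ (['A','T','G','C'] : List Char)

-- one iteration of B's loop body: the new value of `run`
def pvStep (run : Nat) (p2 c : Char) : Nat :=
  if pvIsBase c = false then 0
  else if 2 ≤ run ∧ c = p2 then run + 1
  else if 1 ≤ run then 2
  else 1

-- B's for-loop with early return False when run reaches the threshold
def pvLoop (threshold : Int) : List Char → Nat → Char → Char → Bool
  | [], _, _, _ => true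
  | c :: rest, run, p2, p1 =>
    let run' := pvStep run p2 c
    if threshold ≤ (run' : Int) then false else pvLoop threshold rest run' p1 c

def check_dinucleotide_repeats_alt (seq : String) (max_repeats : Int) : Bool :=
  pvLoop (2 * (max_repeats + 1)) seq.toList 0 ' ' ' '

-- ===== PRECONDITION & SPEC =====
-- On the empty sequence with max_repeats <= -1, A returns False because the repeat string is
-- empty and '' is a substring of everything (an accident of str multiplication); B returns True,
-- which is intended since an empty sequence contains no repeated dinucleotide.
def D_check_dinucleotide_repeats (seq : String) (max_repeats : Int) : Prop :=
  seq = "" ∧ max_repeats + 1 ≤ 0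
instance (seq : String) (max_repeats : Int) : Decidable (D_check_dinucleotide_repeats seq max_repeats) := by unfold D_check_dinucleotide_repeats; infer_instance

def Spec_check_dinucleotide_repeats (seq : String) (max_repeats : Int) (out : Bool) : Prop := ¬ D_check_dinucleotide_repeats seq max_repeats → out = check_dinucleotide_repeats_alt seq max_repeats
instance (seq : String) (max_repeats : Int) (out : Bool) : Decidable (Spec_check_dinucleotide_repeats seq max_repeats out) := by unfold Spec_check_dinucleotide_repeats; infer_instance

def pvDiffWitness_check_dinucleotide_repeats : String × Int := ("", -1)
def pvDiffWitnessOut_check_dinucleotide_repeats : Bool × Bool := (false, true)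

-- ===== CLAIM (what is proved, stated in full; the proofs are below) =====
def Claim_unchanged_check_dinucleotide_repeats : Prop := ∀ (seq : String) (max_repeats : Int), Dom_check_dinucleotide_repeats seq max_repeats → Spec_check_dinucleotide_repeats seq max_repeats (check_dinucleotide_repeats seq max_repeats)
def Claim_changed_check_dinucleotide_repeats : Prop := Dom_check_dinucleotide_repeats (pvDiffWitness_check_dinucleotide_repeats.1) (pvDiffWitness_check_dinucleotide_repeats.2) ∧ D_check_dinucleotide_repeats (pvDiffWitness_check_dinucleotide_repeats.1) (pvDiffWitness_check_dinucleotide_repeats.2) ∧ check_dinucleotide_repeats (pvDiffWitness_check_dinucleotide_repeats.1) (pvDiffWitness_check_dinucleotide_repeats.2) = pvDiffWitnessOut_check_dinucleotide_repeats.1 ∧ check_dinucleotide_repeats_alt (pvDiffWitness_check_dinucleotide_repeats.1) (pvDiffWitness_check_dinucleotide_repeats.2) = pvDiffWitnessOut_check_dinucleotide_repeats.2 ∧ pvDiffWitnessOut_check_dinucleotide_repeats.1 ≠ pvDiffWitnessOut_check_dinucleotide_repeats.2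
def Claim_exact_check_dinucleotide_repeats : Prop := ∀ (seq : String) (max_repeats : Int), Dom_check_dinucleotide_repeats seq max_repeats → D_check_dinucleotide_repeats seq max_repeats → check_dinucleotide_repeats seq max_repeats ≠ check_dinucleotide_repeats_alt seq max_repeats

-- ===== LEMMAS AND PROOFS =====

-- the alternating word x y x y … of length m
def pvAlt (x y : Char) : Nat → List Char
  | 0 => []
  | k+1 => x :: pvAlt y x k

lemma pvAlt_succ_succ (x y : Char) (k : Nat) : pvAlt x y (k+2) = x :: y :: pvAlt x y k := rfl

-- the value of `run` after B has processed a prefix, as a function of the REVERSED prefix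
def pvRun : List Char → Nat
  | [] => 0
  | c :: rs => pvStep (pvRun rs) (rs.getD 1 ' ') c

lemma pvRun_pos_head {c : Char} {rs : List Char} (h : 1 ≤ pvRun (c :: rs)) : pvIsBase c = true := by
  simp only [pvRun, pvStep] at h
  split_ifs at h with h1 h2 h3 <;> simp_all

lemma pvAlt_le_run : ∀ (m : Nat) (x y : Char) (l : List Char),
    pvAlt x y m <+: l → pvIsBase x = true → pvIsBase y = true → m ≤ pvRun l := by
  intro m
  induction m with
  | zero => intro x y l _ _ _; omega
  | succ k ih =>
    intro x y l hp hx hy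
    cases l with
    | nil => simp [pvAlt] at hp
    | cons c rs =>
      rw [show pvAlt x y (k+1) = x :: pvAlt y x k from rfl, List.cons_prefix_cons] at hp
      obtain ⟨rfl, hp⟩ := hp
      have hk : k ≤ pvRun rs := ih y x rs hp hy hx
      simp only [pvRun, pvStep]
      split_ifs with h1 h2 h3
      · simp_all
      · omega
      · -- run' = 2 : if k ≥ 2 the first branch would have fired
        by_contra hcon
        have hk2 : 2 ≤ k := by omega
        obtain ⟨k', rfl⟩ : ∃ k', k = k' + 2 := ⟨k - 2, by omega⟩
        rw [pvAlt_succ_succ] at hp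
        cases rs with
        | nil => simp at hp
        | cons a rs' =>
          rw [List.cons_prefix_cons] at hp
          obtain ⟨rfl, hp⟩ := hp
          cases rs' with
          | nil => simp at hp
          | cons b rs'' =>
            rw [List.cons_prefix_cons] at hp
            obtain ⟨rfl, _⟩ := hp
            exact h2 ⟨by omega, by simp⟩
      · omega

lemma pvRun_exists_alt : ∀ (l : List Char) (m : Nat), m ≤ pvRun l →
    ∃ x y, pvIsBase x = true ∧ pvIsBase y = true ∧ pvAlt x y m <+: l := by
  intro l
  induction l with
  | nil =>
    intro m hm
    simp only [pvRun] at hm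
    interval_cases m
    exact ⟨'A', 'A', by decide, by decide, by simp [pvAlt]⟩
  | cons c rs ih =>
    intro m hm
    cases m with
    | zero => exact ⟨'A', 'A', by decide, by decide, by simp [pvAlt]⟩
    | succ k =>
      simp only [pvRun, pvStep] at hm
      split_ifs at hm with h1 h2 h3
      · omega
      · -- c is a base, 2 ≤ run rs, c = rs.getD 1 ' '
        have hc : pvIsBase c = true := by simp_all
        obtain ⟨a, b, ha, hb, hp⟩ := ih k (by omega)
        cases k with
        | zero =>
          exact ⟨c, 'A', hc, by decide, by
            rw [show pvAlt c 'A' 1 = [c] from rfl]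
            simp [List.cons_prefix_cons]⟩
        | succ k' =>
          rw [show pvAlt a b (k'+1) = a :: pvAlt b a k' from rfl] at hp
          cases rs with
          | nil => simp at hp
          | cons a' rs' =>
            rw [List.cons_prefix_cons] at hp
            obtain ⟨rfl, hp⟩ := hp
            refine ⟨c, a, hc, ha, ?_⟩
            rw [show pvAlt c a (k'+2) = c :: a :: pvAlt c a k' from rfl, List.cons_prefix_cons]
            refine ⟨rfl, ?_⟩
            rw [List.cons_prefix_cons]
            refine ⟨rfl, ?_⟩
            cases k' with
            | zero => simp [pvAlt]
            | succ k'' =>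
              rw [show pvAlt b a (k''+1) = b :: pvAlt a b k'' from rfl] at hp
              cases rs' with
              | nil => simp at hp
              | cons b' rs'' =>
                rw [List.cons_prefix_cons] at hp
                obtain ⟨rfl, hp⟩ := hp
                have hcb : c = b := by simpa using h2.2
                subst hcb
                rw [show pvAlt c a (k''+1) = c :: pvAlt a c k'' from rfl, List.cons_prefix_cons]
                exact ⟨rfl, hp⟩
      · -- run' = 2
        have hc : pvIsBase c = true := by simp_all
        cases k with
        | zero => exact ⟨c, 'A', hc, by decide, by
            rw [show pvAlt c 'A' 1 = [c] from rfl]; simp [List.cons_prefix_cons]⟩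
        | succ k' =>
          have hk : k' = 0 := by omega
          subst hk
          cases rs with
          | nil => simp [pvRun] at h3
          | cons a rs' =>
            have ha : pvIsBase a = true := pvRun_pos_head h3
            refine ⟨c, a, hc, ha, ?_⟩
            rw [show pvAlt c a 2 = [c, a] from rfl]
            simp [List.cons_prefix_cons]
      · -- run' = 1
        have hc : pvIsBase c = true := by simp_all
        have hk : k = 0 := by omega
        subst hk
        exact ⟨c, 'A', hc, by decide, by
          rw [show pvAlt c 'A' 1 = [c] from rfl]; simp [List.cons_prefix_cons]⟩

lemma pvLoop_iff (t : Int) : ∀ (s rev : List Char),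
    pvLoop t s (pvRun rev) (rev.getD 1 ' ') (rev.getD 0 ' ') = true ↔
    ∀ k : Nat, 1 ≤ k → k ≤ s.length → ((pvRun ((s.take k).reverse ++ rev) : Int) < t) := by
  intro s
  induction s with
  | nil =>
    intro rev
    simp only [pvLoop, List.length_nil]
    constructor
    · intro _ k h1 h2; omega
    · intro _; trivial
  | cons c s' ih =>
    intro rev
    have hrun : pvStep (pvRun rev) (rev.getD 1 ' ') c = pvRun (c :: rev) := rfl
    simp only [pvLoop, hrun]
    by_cases ht : t ≤ ((pvRun (c :: rev) : Nat) : Int)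
    · rw [if_pos ht]
      constructor
      · intro h; exact absurd h Bool.false_ne_true
      · intro h
        exfalso
        have := h 1 (by omega) (by simp)
        simp only [List.take_succ_cons, List.take_zero, List.reverse_cons, List.reverse_nil,
          List.nil_append, List.cons_append] at this
        omega
    · rw [if_neg ht]
      have h0 : (c :: rev).getD 1 ' ' = rev.getD 0 ' ' := by cases rev <;> rfl
      have h1 : (c :: rev).getD 0 ' ' = c := rfl
      have ihc := ih (c :: rev)
      rw [h0, h1] at ihc
      rw [ihc]
      constructor
      · intro h k hk1 hk2
        cases k with
        | zero => omega
        | succ k' =>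
          cases Nat.eq_zero_or_pos k' with
          | inl hz =>
            subst hz
            simpa using (by omega : ((pvRun (c :: rev) : Nat) : Int) < t)
          | inr hpos =>
            have := h k' hpos (by simpa using hk2)
            simpa [List.take_succ_cons, List.reverse_cons, List.append_assoc] using this
      · intro h k hk1 hk2
        have := h (k+1) (by omega) (by simpa using hk2)
        simpa [List.take_succ_cons, List.reverse_cons, List.append_assoc] using this

lemma pvFlat_replicate (x y : Char) : ∀ n : Nat, (List.replicate n [x, y]).flatten = pvAlt x y (2 * n) := by
  intro n
  induction n with
  | zero => rfl
  | succ n ih =>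
    rw [List.replicate_succ, List.flatten_cons, ih,
      show 2 * (n + 1) = 2 * n + 2 by ring, pvAlt_succ_succ]
    rfl

lemma pvRepeat_pair (x y : Char) (z : Int) :
    PySem.List.pyRepeat [x, y] z = pvAlt x y (2 * z.toNat) := by
  simp [PySem.List.pyRepeat, pvFlat_replicate]

lemma pvAlt_append_pair (x y : Char) : ∀ n : Nat, pvAlt x y (2 * n) ++ [x, y] = pvAlt x y (2 * n + 2) := by
  intro n
  induction n with
  | zero => rfl
  | succ n ih =>
    rw [show 2 * (n + 1) = 2 * n + 2 by ring, pvAlt_succ_succ, pvAlt_succ_succ]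
    simp only [List.cons_append, ih]

lemma pvAlt_reverse (x y : Char) : ∀ n : Nat, (pvAlt x y (2 * n)).reverse = pvAlt y x (2 * n) := by
  intro n
  induction n with
  | zero => rfl
  | succ n ih =>
    rw [show 2 * (n + 1) = 2 * n + 2 by ring, pvAlt_succ_succ]
    simp only [List.reverse_cons, List.append_assoc, ih]
    simpa using pvAlt_append_pair y x n

lemma pvInfix_iff_rev_prefix (w s : List Char) :
    w <:+: s ↔ ∃ k, k ≤ s.length ∧ w.reverse <+: (s.take k).reverse := by
  constructor
  · intro h
    have h' : w.reverse <:+: s.reverse := List.reverse_infix.mpr h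
    obtain ⟨t, hp, hs⟩ := List.infix_iff_prefix_suffix.mp h'
    have hps : t.reverse <+: s := List.reverse_suffix.mp (by rwa [List.reverse_reverse])
    refine ⟨t.reverse.length, hps.length_le, ?_⟩
    have he : s.take t.reverse.length = t.reverse := (List.prefix_iff_eq_take.mp hps).symm
    rw [he, List.reverse_reverse]
    exact hp
  · rintro ⟨k, _, hp⟩
    have h1 : w <:+ s.take k := List.reverse_prefix.mp hp
    exact h1.isInfix.trans (List.take_prefix k s).isInfix

lemma pvA_true_iff (seq : String) (mr : Int) :
    check_dinucleotide_repeats seq mr = true ↔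
    ∀ x y : Char, pvIsBase x = true → pvIsBase y = true →
      ¬ (PySem.List.pyRepeat [x, y] (mr + 1)) <:+: seq.toList := by
  have hr : PySem.List.pyRange 0 4 1 = [0,1,2,3] := by decide
  have e0 : (PySem.Str.pyGet? "ATGC" 0).getD ' ' = 'A' := by decide
  have e1 : (PySem.Str.pyGet? "ATGC" 1).getD ' ' = 'T' := by decide
  have e2 : (PySem.Str.pyGet? "ATGC" 2).getD ' ' = 'G' := by decide
  have e3 : (PySem.Str.pyGet? "ATGC" 3).getD ' ' = 'C' := by decide
  unfold check_dinucleotide_repeats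
  rw [hr]
  simp only [List.any_cons, List.any_nil, e0, e1, e2, e3]
  simp only [Bool.or_false, Bool.not_eq_true', Bool.or_eq_false_iff, PySem.Chars.isIn_eq_false_iff]
  constructor
  · rintro ⟨⟨h1,h2,h3,h4⟩,⟨h5,h6,h7,h8⟩,⟨h9,h10,h11,h12⟩,⟨h13,h14,h15,h16⟩⟩ x y hx hy
    simp only [pvIsBase, List.mem_cons, List.not_mem_nil, or_false, decide_eq_true_eq] at hx hy
    rcases hx with rfl|rfl|rfl|rfl <;> rcases hy with rfl|rfl|rfl|rfl <;> assumption
  · intro h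
    refine ⟨⟨?_,?_,?_,?_⟩,⟨?_,?_,?_,?_⟩,⟨?_,?_,?_,?_⟩,⟨?_,?_,?_,?_⟩⟩ <;>
      exact h _ _ (by decide) (by decide)

lemma pvAlt_length (x y : Char) : ∀ m : Nat, (pvAlt x y m).length = m := by
  intro m
  induction m generalizing x y with
  | zero => rfl
  | succ k ih => simp [pvAlt, ih]

-- with a nonpositive threshold, the loop fails on any nonempty input
lemma pvLoop_nonpos {t : Int} (ht : t ≤ 0) (c : Char) (s : List Char) (run : Nat) (p2 p1 : Char) :
    pvLoop t (c :: s) run p2 p1 = false := by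
  simp only [pvLoop]
  rw [if_pos (le_trans ht (Int.natCast_nonneg _))]

-- A returns false whenever mr + 1 ≤ 0 (the repeat string is empty)
lemma pvA_false_of_nonpos {seq : String} {mr : Int} (hneg : mr + 1 ≤ 0) :
    check_dinucleotide_repeats seq mr = false := by
  cases hAv : check_dinucleotide_repeats seq mr with
  | false => rfl
  | true =>
    exfalso
    have := (pvA_true_iff seq mr).mp hAv 'A' 'A' (by decide) (by decide)
    rw [pvRepeat_pair, show (mr+1).toNat = 0 by omega] at this
    exact this (by simp [pvAlt])

-- ===== VERDICT (by name: the statement is the Claim_ definition above) =====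
theorem check_dinucleotide_repeats_spec : Claim_unchanged_check_dinucleotide_repeats := by
  unfold Claim_unchanged_check_dinucleotide_repeats
  intro seq mr _dom
  unfold Spec_check_dinucleotide_repeats
  intro hD
  by_cases hneg : mr + 1 ≤ 0
  · -- A returns False; seq is nonempty (else we are inside D_), so B's loop also fails at once
    have hne : seq ≠ "" := fun h => hD ⟨h, hneg⟩
    have hlne : seq.toList ≠ [] := fun h => hne (by
      have := congrArg String.ofList h
      simpa using this)
    rw [pvA_false_of_nonpos hneg]
    unfold check_dinucleotide_repeats_alt
    cases hsl : seq.toList with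
    | nil => exact absurd hsl hlne
    | cons c s => rw [pvLoop_nonpos (by omega) c s]
  · -- threshold = 2*(mr+1) ≥ 2
    have hn1 : 1 ≤ (mr + 1).toNat := by omega
    set n : Nat := (mr + 1).toNat with hn
    have hcast : ((2 * n : Nat) : Int) = 2 * (mr + 1) := by omega
    have hB : check_dinucleotide_repeats_alt seq mr
        = pvLoop (2 * (mr + 1)) seq.toList 0 ' ' ' ' := rfl
    have hloop := pvLoop_iff (2 * (mr + 1)) seq.toList []
    rw [show pvRun [] = 0 from rfl, show (([] : List Char).getD 1 ' ') = ' ' from rfl,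
      show (([] : List Char).getD 0 ' ') = ' ' from rfl] at hloop
    simp only [List.append_nil] at hloop
    have key : check_dinucleotide_repeats seq mr = true ↔
        check_dinucleotide_repeats_alt seq mr = true := by
      rw [pvA_true_iff, hB, hloop]
      constructor
      · intro hA k hk1 hk2
        by_contra hcon
        have hge : 2 * n ≤ pvRun ((seq.toList.take k).reverse) := by omega
        obtain ⟨x, y, hx, hy, hp⟩ := pvRun_exists_alt _ _ hge
        refine hA y x hy hx ?_
        rw [pvRepeat_pair]
        rw [pvInfix_iff_rev_prefix]
        exact ⟨k, hk2, by rw [pvAlt_reverse]; exact hp⟩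
      · intro hBt x y hx hy hinf
        rw [pvRepeat_pair, pvInfix_iff_rev_prefix] at hinf
        obtain ⟨k, hk, hp⟩ := hinf
        rw [pvAlt_reverse] at hp
        have hge : 2 * n ≤ pvRun ((seq.toList.take k).reverse) :=
          pvAlt_le_run _ y x _ hp hy hx
        have hk1 : 1 ≤ k := by
          by_contra hk0
          have hkz : k = 0 := by omega
          subst hkz
          have := hp.length_le
          rw [pvAlt_length] at this
          simp at this
          omega
        have := hBt k hk1 hk
        omega
    cases hAv : check_dinucleotide_repeats seq mr with
    | true => exact ((key.mp hAv).symm)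
    | false =>
      cases hBv : check_dinucleotide_repeats_alt seq mr with
      | false => rfl
      | true => exact absurd (key.mpr hBv) (by simp [hAv])

theorem check_dinucleotide_repeats_changed : Claim_changed_check_dinucleotide_repeats := by
  unfold Claim_changed_check_dinucleotide_repeats; decide

theorem check_dinucleotide_repeats_tight : Claim_exact_check_dinucleotide_repeats := by
  unfold Claim_exact_check_dinucleotide_repeats
  intro seq mr _dom hD
  obtain ⟨rfl, hneg⟩ := hD
  rw [pvA_false_of_nonpos hneg]
  have : check_dinucleotide_repeats_alt "" mr = true := rfl
  rw [this]
  decide
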